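-- pv_equiv track=rewrite | github.com/SatoshiNakamotou/Prueba | ClaseValidacion.py | ObtenerColorVertice
-- ===== SOURCE A (Python) =====
-- def ObtenerColorVertice( vertice , listado_vertices):
--     '''El listado de vertices ingresados corresponde a un lista que contiene el par  [Vertice,Color_vertice]'''
--     '''Por ejemplo : [['A','R'],['B','R'],['C','C'],['D','V'],['E','C']].
--     '''
--     color_ingresado = ''
--     for v in listado_vertices:
--         if v[0] == vertice:
--             color_ingresado = v[1]
--     return color_ingresado
-- ===== SOURCE B (Python) =====
-- def ObtenerColorVertice(vertice, listado_vertices):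
--     for v in reversed(listado_vertices):
--         if v[0] == vertice:
--             return v[1]
--     return ''
-- ===== Notes on version B (the rewrite author's own statement) =====
-- stated objective: simpler
-- what changed: B scans the list backwards and returns immediately on the first vertex whose head matches (= A's last forward match), instead of A's full forward scan with an overwritten accumulator.
-- outside the precondition, e.g. on ObtenerColorVertice('A', [['A']]): A raises IndexError, B raises IndexError; on ObtenerColorVertice('A', [[]]): A raises IndexError, B raises IndexError
import Mathlib
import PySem

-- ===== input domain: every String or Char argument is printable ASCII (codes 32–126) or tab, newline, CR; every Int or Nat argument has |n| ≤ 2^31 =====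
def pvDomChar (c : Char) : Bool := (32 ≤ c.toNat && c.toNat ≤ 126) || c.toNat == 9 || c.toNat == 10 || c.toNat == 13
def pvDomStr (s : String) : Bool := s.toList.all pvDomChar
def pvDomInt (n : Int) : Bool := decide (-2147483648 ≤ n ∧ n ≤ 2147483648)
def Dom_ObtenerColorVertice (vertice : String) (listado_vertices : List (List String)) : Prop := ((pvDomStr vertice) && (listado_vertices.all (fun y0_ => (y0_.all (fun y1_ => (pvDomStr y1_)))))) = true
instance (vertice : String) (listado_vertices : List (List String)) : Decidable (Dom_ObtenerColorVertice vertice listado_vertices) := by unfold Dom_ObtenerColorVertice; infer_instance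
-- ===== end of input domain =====

-- B replaces A's full forward scan with an overwritten accumulator by a backward scan
-- with early return on the first match (simpler); same '' default when nothing matches.

-- ===== PORT A =====
-- A: color_ingresado = ''; for v in listado_vertices: if v[0] == vertice: color_ingresado = v[1]
-- v[0] / v[1] are PySem.List.pyGet?; '.getD ""' is only reached outside Pre_ (where Python raises).
def ObtenerColorVertice (vertice : String) (listado_vertices : List (List String)) : String :=
  listado_vertices.foldl
    (fun color_ingresado v =>
      if (PySem.List.pyGet? v 0).getD "" = vertice then (PySem.List.pyGet? v 1).getD ""
      else color_ingresado)
    ""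

-- ===== PORT B =====
-- B: for v in reversed(listado_vertices): if v[0] == vertice: return v[1]; return ''
def pvGoRev (vertice : String) : List (List String) → String
  | [] => ""
  | v :: rest =>
      if (PySem.List.pyGet? v 0).getD "" = vertice then (PySem.List.pyGet? v 1).getD ""
      else pvGoRev vertice rest

def ObtenerColorVertice_alt (vertice : String) (listado_vertices : List (List String)) : String :=
  pvGoRev vertice listado_vertices.reverse

-- ===== PRECONDITION & SPEC =====
-- Pre_ excludes exactly the inputs where Python A raises IndexError: an empty inner list
-- (v[0] fails), or a matching inner list of length 1 (v[1] fails).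
def Pre_ObtenerColorVertice (vertice : String) (listado_vertices : List (List String)) : Prop :=
  ∀ v ∈ listado_vertices, 1 ≤ v.length ∧ (v.headD "" = vertice → 2 ≤ v.length)
instance (vertice : String) (listado_vertices : List (List String)) : Decidable (Pre_ObtenerColorVertice vertice listado_vertices) := by unfold Pre_ObtenerColorVertice; infer_instance

def pvWitness_ObtenerColorVertice : String × List (List String) :=
  ("A", [["A", "R"], ["B", "V"], ["A", "C"]])

def Spec_ObtenerColorVertice (vertice : String) (listado_vertices : List (List String)) (out : String) : Prop := out = ObtenerColorVertice_alt vertice listado_vertices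
instance (vertice : String) (listado_vertices : List (List String)) (out : String) : Decidable (Spec_ObtenerColorVertice vertice listado_vertices out) := by unfold Spec_ObtenerColorVertice; infer_instance

-- ===== CLAIM (what is proved, stated in full; the proofs are below) =====
def Claim_equal_ObtenerColorVertice : Prop := ∀ (vertice : String) (listado_vertices : List (List String)), Dom_ObtenerColorVertice vertice listado_vertices → Pre_ObtenerColorVertice vertice listado_vertices → Spec_ObtenerColorVertice vertice listado_vertices (ObtenerColorVertice vertice listado_vertices)

-- ===== LEMMAS AND PROOFS =====

-- First match of a list, as an Option (proof-only characterisation of pvGoRev).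
def pvFirst? (vertice : String) : List (List String) → Option String
  | [] => none
  | v :: rest =>
      if (PySem.List.pyGet? v 0).getD "" = vertice then some ((PySem.List.pyGet? v 1).getD "")
      else pvFirst? vertice rest

theorem pvGoRev_eq_first (vertice : String) (l : List (List String)) :
    pvGoRev vertice l = (pvFirst? vertice l).getD "" := by
  induction l with
  | nil => rfl
  | cons v t ih => simp [pvGoRev, pvFirst?]; split_ifs <;> simp [ih]

theorem pvFirst?_append (vertice : String) (l m : List (List String)) :
    pvFirst? vertice (l ++ m) = (pvFirst? vertice l).or (pvFirst? vertice m) := by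
  induction l with
  | nil => rfl
  | cons v t ih => simp [pvFirst?]; split_ifs <;> simp [ih]

theorem pvFold_eq_first (vertice : String) (l : List (List String)) (acc : String) :
    l.foldl
      (fun color_ingresado v =>
        if (PySem.List.pyGet? v 0).getD "" = vertice then (PySem.List.pyGet? v 1).getD ""
        else color_ingresado) acc
    = (pvFirst? vertice l.reverse).getD acc := by
  induction l generalizing acc with
  | nil => rfl
  | cons v t ih =>
      simp only [List.foldl_cons, ih, List.reverse_cons, pvFirst?_append]
      cases h : pvFirst? vertice t.reverse with
      | some c => simp
      | none => simp [pvFirst?]; split_ifs <;> simp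

-- ===== VERDICT (by name: the statement is the Claim_ definition above) =====
theorem ObtenerColorVertice_spec : Claim_equal_ObtenerColorVertice := by
  intro vertice l _ _
  show ObtenerColorVertice vertice l = ObtenerColorVertice_alt vertice l
  rw [ObtenerColorVertice, ObtenerColorVertice_alt, pvFold_eq_first, pvGoRev_eq_first]
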